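-- pv_equiv track=rewrite | github.com/fatihaltiok/Agentus-Timus | orchestration/adaptive_planner.py | _covers_gap
-- ===== SOURCE A (Python) =====
-- from typing import Any, Dict, Iterable, List, Mapping, Sequence, Tuple
--
-- def _covers_gap(gap: str, chain: Sequence[str]) -> bool:
--     normalized = tuple(chain)
--     if gap in {"live_lookup_stage_missing", "location_context_stage_missing"}:
--         return "executor" in normalized
--     if gap in {"artifact_output_stage_missing", "structured_table_stage_missing"}:
--         return "document" in normalized
--     if gap == "delivery_stage_missing":
--         return "communication" in normalized
--     if gap == "verification_stage_missing":
--         return any(agent in normalized for agent in ("research", "system"))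
--     return False
-- ===== SOURCE B (Python) =====
-- # Inverted index: which gap types each agent covers; scan the chain once.
-- _AGENT_GAPS = {
--     "executor": ("live_lookup_stage_missing", "location_context_stage_missing"),
--     "document": ("artifact_output_stage_missing", "structured_table_stage_missing"),
--     "communication": ("delivery_stage_missing",),
--     "research": ("verification_stage_missing",),
--     "system": ("verification_stage_missing",),
-- }
--
-- def _covers_gap(gap, chain):
--     return any(gap in _AGENT_GAPS.get(agent, ()) for agent in chain)
-- ===== Notes on version B (the rewrite author's own statement) =====
-- stated objective: alternative
-- what changed: Inverts the traversal: instead of branching on the gap and searching the chain for each required agent, B scans the chain once and tests each agent against an inverted agent-to-gaps index.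
import Mathlib
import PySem

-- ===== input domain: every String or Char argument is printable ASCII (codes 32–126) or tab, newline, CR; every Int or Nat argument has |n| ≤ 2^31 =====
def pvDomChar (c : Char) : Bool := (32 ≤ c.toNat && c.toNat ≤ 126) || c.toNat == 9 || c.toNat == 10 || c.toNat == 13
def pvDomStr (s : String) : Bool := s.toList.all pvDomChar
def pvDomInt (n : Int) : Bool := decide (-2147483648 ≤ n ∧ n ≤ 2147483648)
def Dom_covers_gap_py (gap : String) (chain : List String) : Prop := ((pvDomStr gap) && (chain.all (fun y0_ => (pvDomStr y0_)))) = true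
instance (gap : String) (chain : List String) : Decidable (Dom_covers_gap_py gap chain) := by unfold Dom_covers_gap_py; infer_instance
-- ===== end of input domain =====

-- B inverts A's traversal: it scans the chain once and tests each agent against an inverted agent→gaps index (objective: alternative).
-- ===== PORT A =====
def covers_gap_py (gap : String) (chain : List String) : Bool :=
  let normalized := chain
  if gap = "live_lookup_stage_missing" ∨ gap = "location_context_stage_missing" then
    normalized.contains "executor"
  else if gap = "artifact_output_stage_missing" ∨ gap = "structured_table_stage_missing" then
    normalized.contains "document"
  else if gap = "delivery_stage_missing" then
    normalized.contains "communication"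
  else if gap = "verification_stage_missing" then
    ["research", "system"].any (fun agent => normalized.contains agent)
  else
    false

-- ===== PORT B =====
-- inverted index: agent ↦ the gap types it covers
def agentGaps : PySem.Dict String (List String) := PySem.Dict.ofList
  [ ("executor", ["live_lookup_stage_missing", "location_context_stage_missing"])
  , ("document", ["artifact_output_stage_missing", "structured_table_stage_missing"])
  , ("communication", ["delivery_stage_missing"])
  , ("research", ["verification_stage_missing"])
  , ("system", ["verification_stage_missing"]) ]

def covers_gap_py_alt (gap : String) (chain : List String) : Bool :=
  chain.any (fun agent => (PySem.Dict.getD agentGaps agent []).contains gap)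

-- ===== PRECONDITION & SPEC =====
def Spec_covers_gap_py (gap : String) (chain : List String) (out : Bool) : Prop := out = covers_gap_py_alt gap chain
instance (gap : String) (chain : List String) (out : Bool) : Decidable (Spec_covers_gap_py gap chain out) := by unfold Spec_covers_gap_py; infer_instance

-- ===== CLAIM (what is proved, stated in full; the proofs are below) =====
def Claim_equal_covers_gap_py : Prop := ∀ (gap : String) (chain : List String), Dom_covers_gap_py gap chain → Spec_covers_gap_py gap chain (covers_gap_py gap chain)

-- ===== LEMMAS AND PROOFS =====
-- agentGaps, built by ofList, as a literal Dict
theorem agentGaps_eq : agentGaps = PySem.Dict.mk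
  [ ("executor", ["live_lookup_stage_missing", "location_context_stage_missing"])
  , ("document", ["artifact_output_stage_missing", "structured_table_stage_missing"])
  , ("communication", ["delivery_stage_missing"])
  , ("research", ["verification_stage_missing"])
  , ("system", ["verification_stage_missing"]) ] := by decide

-- B's per-agent test, resolved by case analysis on which index key the agent is.
theorem perAgent_eq (gap agent : String) :
    (PySem.Dict.getD agentGaps agent []).contains gap =
      (((agent == "executor") && (gap == "live_lookup_stage_missing" || gap == "location_context_stage_missing"))
       || ((agent == "document") && (gap == "artifact_output_stage_missing" || gap == "structured_table_stage_missing"))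
       || ((agent == "communication") && (gap == "delivery_stage_missing"))
       || ((agent == "research" || agent == "system") && (gap == "verification_stage_missing"))) := by
  rw [PySem.Dict.getD, agentGaps_eq]
  simp only [PySem.Dict.get?_mk_cons]
  split_ifs with h1 h2 h3 h4 h5
  · obtain rfl := eq_of_beq h1; simp [Bool.beq_eq_decide_eq]
  · obtain rfl := eq_of_beq h2; simp [Bool.beq_eq_decide_eq]
  · obtain rfl := eq_of_beq h3; simp [Bool.beq_eq_decide_eq]
  · obtain rfl := eq_of_beq h4; simp [Bool.beq_eq_decide_eq]
  · obtain rfl := eq_of_beq h5; simp [Bool.beq_eq_decide_eq]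
  · simp_all [PySem.Dict.get?, Bool.beq_eq_decide_eq, eq_comm]

-- scanning the chain for the agents that cover the gap = testing membership of the required agent(s)
theorem any_beq_eq_contains (x : String) (chain : List String) :
    (chain.any fun a => a == x) = chain.contains x := by
  induction chain with
  | nil => rfl
  | cons a t ih =>
    simp only [List.any_cons, List.contains_cons, ih]
    have hc : (a == x) = (x == a) := by simp [Bool.beq_eq_decide_eq, eq_comm]
    rw [hc]

theorem any_or_split (p q : String → Bool) (chain : List String) :
    (chain.any fun a => p a || q a) = (chain.any p || chain.any q) := by
  induction chain with
  | nil => rfl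
  | cons a t ih =>
    simp only [List.any_cons, ih]
    cases p a <;> cases q a <;> cases t.any p <;> cases t.any q <;> rfl

-- ===== VERDICT (by name: the statement is the Claim_ definition above) =====
theorem covers_gap_py_spec : Claim_equal_covers_gap_py := by
  intro gap chain _
  unfold Spec_covers_gap_py covers_gap_py covers_gap_py_alt
  simp only [perAgent_eq]
  split_ifs with h1 h2 h3 h4
  · rcases h1 with h1 | h1 <;> subst h1 <;>
      simp [any_beq_eq_contains]
  · rcases h2 with h2 | h2 <;> subst h2 <;>
      simp [any_beq_eq_contains]
  · subst h3
    simp [any_beq_eq_contains]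
  · subst h4
    simp [any_or_split, any_beq_eq_contains]
  · have e1 : (gap == "live_lookup_stage_missing") = false := by
      simp; rintro rfl; exact h1 (Or.inl rfl)
    have e2 : (gap == "location_context_stage_missing") = false := by
      simp; rintro rfl; exact h1 (Or.inr rfl)
    have e3 : (gap == "artifact_output_stage_missing") = false := by
      simp; rintro rfl; exact h2 (Or.inl rfl)
    have e4 : (gap == "structured_table_stage_missing") = false := by
      simp; rintro rfl; exact h2 (Or.inr rfl)
    have e5 : (gap == "delivery_stage_missing") = false := by
      simp; rintro rfl; exact h3 rfl
    have e6 : (gap == "verification_stage_missing") = false := by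
      simp; rintro rfl; exact h4 rfl
    simp [e1, e2, e3, e4, e5, e6]
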